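-- pv_equiv track=rewrite | github.com/thisAbdU/A2SV-contest-Exercises | B_Make_It_Ugly.py | make_it_ugly
-- ===== SOURCE A (Python) =====
-- def make_it_ugly(arr):
--     if len(set(arr)) == 1:
--         return -1
--     slow = 0
--     no = 0
--     for fast in range(len(arr)):
--         if arr[slow] == arr[fast]:
--             no += 1
--         else:
--             break
--     return no
-- ===== SOURCE B (Python) =====
-- def make_it_ugly(arr):
--     # Build the run-length encoding of the whole array, then read the answer
--     # off it: one run means uniform (-1), otherwise the first run's length.
--     runs = []
--     for x in arr:
--         if runs and runs[-1][0] == x: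
--             runs[-1] = (x, runs[-1][1] + 1)
--         else:
--             runs.append((x, 1))
--     if len(runs) == 1:
--         return -1
--     return runs[0][1] if runs else 0
-- ===== Notes on version B (the rewrite author's own statement) =====
-- stated objective: alternative
-- what changed: B computes the full run-length encoding of the array in one fold and reads the answer off that structure (one run -> -1, empty -> 0, else first run's length), instead of A's set-based uniformity test followed by an early-breaking prefix-count loop.
import Mathlib
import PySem

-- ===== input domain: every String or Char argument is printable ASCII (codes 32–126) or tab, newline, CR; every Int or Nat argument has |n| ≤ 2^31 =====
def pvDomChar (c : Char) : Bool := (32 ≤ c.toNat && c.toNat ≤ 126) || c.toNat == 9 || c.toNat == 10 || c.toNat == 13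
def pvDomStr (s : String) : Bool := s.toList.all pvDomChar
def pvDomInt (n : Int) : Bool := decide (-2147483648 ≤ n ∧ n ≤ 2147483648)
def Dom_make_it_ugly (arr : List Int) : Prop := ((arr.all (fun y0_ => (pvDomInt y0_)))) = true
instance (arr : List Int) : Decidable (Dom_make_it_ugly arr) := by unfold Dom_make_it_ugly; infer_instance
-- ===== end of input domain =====

-- B builds the run-length encoding of the whole array and reads the answer off it,
-- replacing A's set(arr) uniformity test plus early-breaking prefix-count loop (objective: alternative).


-- ===== PORT A =====
-- the 'for fast in range(len(arr)): … else: break' loop of A, with accumulator 'no'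
def make_it_ugly_loop (arr : List Int) : List Int → Int → Int
  | [], no => no
  | fast :: rest, no =>
    if PySem.List.pyGet? arr 0 = PySem.List.pyGet? arr fast then
      make_it_ugly_loop arr rest (no + 1)
    else no

def make_it_ugly (arr : List Int) : Int :=
  if PySem.Set.len (PySem.Set.ofList arr) = 1 then -1
  else make_it_ugly_loop arr (PySem.List.pyRange 0 arr.length 1) 0

-- ===== PORT B =====
-- one step of B's loop body: extend the last run or append a fresh run of length 1
def rle_step (runs : List (Int × Int)) (x : Int) : List (Int × Int) :=
  match runs.getLast? with
  | some last => if last.1 = x then runs.dropLast ++ [(x, last.2 + 1)] else runs ++ [(x, 1)]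
  | none => runs ++ [(x, 1)]

def make_it_ugly_alt (arr : List Int) : Int :=
  let runs := arr.foldl rle_step []
  if runs.length = 1 then -1
  else match runs with
       | [] => 0
       | r :: _ => r.2

-- ===== PRECONDITION & SPEC =====
def Spec_make_it_ugly (arr : List Int) (out : Int) : Prop := out = make_it_ugly_alt arr
instance (arr : List Int) (out : Int) : Decidable (Spec_make_it_ugly arr out) := by unfold Spec_make_it_ugly; infer_instance

-- ===== CLAIM (what is proved, stated in full; the proofs are below) =====
def Claim_equal_make_it_ugly : Prop := ∀ (arr : List Int), Dom_make_it_ugly arr → Spec_make_it_ugly arr (make_it_ugly arr)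

-- ===== LEMMAS AND PROOFS =====

-- proof-only helper: length of the leading run of x's
def pvRun (x : Int) : List Int → Int
  | [] => 0
  | y :: ys => if y = x then 1 + pvRun x ys else 0

-- a nodup list whose elements are all x has length ≤ 1
theorem pv_len_le_one {l : List Int} {x : Int} (hn : l.Nodup)
    (h : ∀ y ∈ l, y = x) : l.length ≤ 1 := by
  match l with
  | [] => simp
  | [a] => simp
  | a :: b :: t =>
    have ha := h a (by simp)
    have hb := h b (by simp)
    subst ha
    simp [hb] at hn

-- set(arr) has one element iff arr = x :: xs with every element equal to x
theorem pv_ofList_len_one (x : Int) (xs : List Int) :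
    PySem.Set.len (PySem.Set.ofList (x :: xs)) = 1 ↔ ∀ y ∈ xs, y = x := by
  have hx : x ∈ PySem.Set.ofList (x :: xs) := by
    rw [PySem.Set.mem_ofList]; simp
  constructor
  · intro h y hy
    have hlen : (PySem.Set.ofList (x :: xs)).length = 1 := by
      simpa [PySem.Set.len] using h
    obtain ⟨z, hz⟩ := List.length_eq_one_iff.mp hlen
    have hy' : y ∈ PySem.Set.ofList (x :: xs) := by
      rw [PySem.Set.mem_ofList]; simp [hy]
    rw [hz] at hx hy'
    simp at hx hy'; omega
  · intro h
    have hall : ∀ y ∈ PySem.Set.ofList (x :: xs), y = x := by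
      intro y hy
      rw [PySem.Set.mem_ofList] at hy
      rcases List.mem_cons.mp hy with hy | hy
      · exact hy
      · exact h y hy
    have h1 : (PySem.Set.ofList (x :: xs)).length ≤ 1 :=
      pv_len_le_one (PySem.Set.nodup_ofList _) hall
    have h2 : 0 < (PySem.Set.ofList (x :: xs)).length := List.length_pos_of_mem hx
    simp [PySem.Set.len]; omega

-- A's loop with remaining indices k..n equals no + pvRun of (drop k), comparing against arr[0]
theorem pv_loop_eq_run (x : Int) (xs : List Int) (k : Nat) (no : Int)
    (hk : k ≤ (x :: xs).length) :
    make_it_ugly_loop (x :: xs) (PySem.List.pyRange k (x :: xs).length 1) no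
      = no + pvRun x ((x :: xs).drop k) := by
  set arr := x :: xs with harr
  induction hn : arr.length - k generalizing k no with
  | zero =>
    have hk' : (arr.length : Int) ≤ k := by omega
    rw [PySem.List.pyRange_one_eq_nil hk']
    have : arr.drop k = [] := List.drop_eq_nil_of_le (by omega)
    simp [make_it_ugly_loop, this, pvRun]
  | succ m ih =>
    have hlt : (k : Int) < arr.length := by omega
    rw [PySem.List.pyRange_one_cons hlt]
    have hkl : k < arr.length := by omega
    have hget0 : PySem.List.pyGet? arr 0 = some x := by
      simp [harr, PySem.List.pyGet?, PySem.List.pyIdx?]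
    have hgetk : PySem.List.pyGet? arr (k : Int) = some arr[k] := by
      simp [PySem.List.pyGet?, PySem.List.pyIdx?, hkl]
    have hdrop : arr.drop k = arr[k] :: arr.drop (k + 1) :=
      List.drop_eq_getElem_cons hkl
    rw [make_it_ugly_loop, hget0, hgetk, hdrop, pvRun]
    by_cases hx : arr[k] = x
    · have : (k : Int) + 1 = ((k + 1 : Nat) : Int) := by push_cast; ring
      rw [if_pos (by rw [hx]), this, ih (k + 1) (no + 1) (by omega) (by omega)]
      rw [if_pos hx]; ring
    · rw [if_neg (by simpa using fun h => hx h.symm), if_neg hx]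
      ring

-- B's fold only ever touches the LAST run: a prefix of runs passes through unchanged
theorem pv_foldl_rle_append (l : List Int) :
    ∀ (acc : List (Int × Int)) (v c : Int),
      List.foldl rle_step (acc ++ [(v, c)]) l = acc ++ List.foldl rle_step [(v, c)] l := by
  induction l with
  | nil => intro acc v c; simp
  | cons x xs ih =>
    intro acc v c
    simp only [List.foldl]
    have hstep : rle_step (acc ++ [(v, c)]) x =
        acc ++ rle_step [(v, c)] x := by
      simp only [rle_step, List.getLast?_concat]
      by_cases hv : v = x <;> simp [hv]
    rw [hstep]
    have hsingle : rle_step [(v, c)] x =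
        if v = x then [(x, c + 1)] else [(v, c), (x, 1)] := by
      by_cases hv : v = x <;> simp [rle_step, List.getLast?, hv]
    rw [hsingle]
    by_cases hv : v = x
    · simp only [if_pos hv]
      exact ih acc x (c + 1)
    · simp only [if_neg hv]
      have h1 := ih (acc ++ [(v, c)]) x 1
      have h2 := ih [(v, c)] x 1
      rw [show acc ++ [(v, c), (x, 1)] = (acc ++ [(v, c)]) ++ [(x, 1)] by simp, h1,
        show ([(v, c), (x, 1)] : List (Int × Int)) = [(v, c)] ++ [(x, 1)] from rfl, h2]
      simp

-- the fold from a single run yields (v, c + leading run) followed by the encoding of the rest,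
-- which is empty exactly when the rest is uniformly v
theorem pv_foldl_single (l : List Int) :
    ∀ (v c : Int), ∃ rs, List.foldl rle_step [(v, c)] l = (v, c + pvRun v l) :: rs ∧
      (rs = [] ↔ ∀ y ∈ l, y = v) := by
  induction l with
  | nil => intro v c; exact ⟨[], by simp [pvRun], by simp⟩
  | cons x xs ih =>
    intro v c
    simp only [List.foldl]
    by_cases hv : v = x
    · have hstep : rle_step [(v, c)] x = [(x, c + 1)] := by
        simp [rle_step, List.getLast?, hv]
      obtain ⟨rs, hfold, hiff⟩ := ih x (c + 1)
      subst hv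
      refine ⟨rs, ?_, ?_⟩
      · rw [hstep, hfold, pvRun, if_pos rfl]; ring_nf
      · rw [hiff]
        constructor
        · intro h y hy
          rcases List.mem_cons.mp hy with hy | hy
          · exact hy
          · exact h y hy
        · intro h y hy; exact h y (by simp [hy])
    · have hstep : rle_step [(v, c)] x = [(v, c), (x, 1)] := by
        simp [rle_step, List.getLast?, hv]
      rw [hstep]
      have happ := pv_foldl_rle_append xs [(v, c)] x 1
      obtain ⟨rs, hfold, _⟩ := ih x 1
      refine ⟨(x, 1 + pvRun x xs) :: rs, ?_, ?_⟩
      · rw [show ([(v, c), (x, 1)] : List (Int × Int)) = [(v, c)] ++ [(x, 1)] from rfl,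
          happ, hfold, pvRun, if_neg (fun h => hv h.symm)]
        simp
      · constructor
        · intro h; exact (List.cons_ne_nil _ _ h).elim
        · intro h; exact (hv (h x (by simp)).symm).elim

-- ===== VERDICT (by name: the statement is the Claim_ definition above) =====
theorem make_it_ugly_spec : Claim_equal_make_it_ugly := by
  intro arr _
  unfold Spec_make_it_ugly
  cases arr with
  | nil =>
    simp [make_it_ugly, make_it_ugly_alt, PySem.Set.ofList, PySem.Set.len,
      make_it_ugly_loop, PySem.List.pyRange_one_eq_nil]
  | cons x xs =>
    have hstep0 : rle_step [] x = [(x, 1)] := by simp [rle_step, List.getLast?]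
    obtain ⟨rs, hfold, hiff⟩ := pv_foldl_single xs x 1
    unfold make_it_ugly make_it_ugly_alt
    simp only [List.foldl, hstep0, hfold]
    by_cases hu : ∀ y ∈ xs, y = x
    · rw [if_pos ((pv_ofList_len_one x xs).mpr hu), hiff.mpr hu]
      simp
    · rw [if_neg (fun h => hu ((pv_ofList_len_one x xs).mp h))]
      have hrs : rs ≠ [] := fun h => hu (hiff.mp h)
      have hlen : ((x, 1 + pvRun x xs) :: rs).length ≠ 1 := by
        simp [List.length_eq_zero_iff, hrs]
      rw [if_neg hlen]
      have hl := pv_loop_eq_run x xs 0 0 (by omega)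
      simp only [Nat.cast_zero, List.drop_zero, zero_add] at hl
      rw [hl, pvRun, if_pos rfl]
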